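-- pv_equiv track=rewrite | github.com/Yixi-Rao/COMP4650 | A2/A2/Q2/transformers.py | train_valid_test
-- ===== SOURCE A (Python) =====
-- def train_valid_test(X, Y, docid, ratio=4):
--     X_train = []
--     Y_train = []
--     X_valid = []
--     Y_valid = []
--
--     idcount_dict = {}
--     valid_docid = []
--     for i, doc in enumerate(X):
--         doc_id = docid[i]
--         if doc_id in idcount_dict:
--             idcount_dict[doc_id] = idcount_dict[doc_id] + 1
--             num_doc              = idcount_dict[doc_id]
--             if (num_doc % ratio) == 0:
--                 valid_docid.append(doc_id)
--                 X_valid.append(doc)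
--                 Y_valid.append(Y[i])
--             else:
--                 X_train.append(doc)
--                 Y_train.append(Y[i])
--         else:
--             idcount_dict[doc_id] = 1
--             X_train.append(doc)
--             Y_train.append(Y[i])
--
--     return X_train, Y_train, X_valid, Y_valid, valid_docid
-- ===== SOURCE B (Python) =====
-- def train_valid_test(X, Y, docid, ratio=4):
--     # Dict-free: the occurrence number of element i is how many times docid[i]
--     # appears in the prefix docid[:i+1]; an element goes to valid iff that
--     # number is a repeat (>1) and divisible by ratio.
--     n = len(X)
--
--     def to_valid(i):
--         c = docid[:i + 1].count(docid[i])
--         return c > 1 and c % ratio == 0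
--
--     train = [i for i in range(n) if not to_valid(i)]
--     valid = [i for i in range(n) if to_valid(i)]
--     return ([X[i] for i in train], [Y[i] for i in train],
--             [X[i] for i in valid], [Y[i] for i in valid],
--             [docid[i] for i in valid])
-- ===== Notes on version B (the rewrite author's own statement) =====
-- stated objective: alternative
-- what changed: A routes each element in one stateful pass with a running docid->count dict and five append-accumulators; B keeps no state at all: it labels index i by counting docid[i] inside the prefix docid[:i+1] (valid iff count>1 and divisible by ratio) and assembles the five outputs from filtered index lists, trading the hash counter for O(n^2) prefix counting.
import Mathlib
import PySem

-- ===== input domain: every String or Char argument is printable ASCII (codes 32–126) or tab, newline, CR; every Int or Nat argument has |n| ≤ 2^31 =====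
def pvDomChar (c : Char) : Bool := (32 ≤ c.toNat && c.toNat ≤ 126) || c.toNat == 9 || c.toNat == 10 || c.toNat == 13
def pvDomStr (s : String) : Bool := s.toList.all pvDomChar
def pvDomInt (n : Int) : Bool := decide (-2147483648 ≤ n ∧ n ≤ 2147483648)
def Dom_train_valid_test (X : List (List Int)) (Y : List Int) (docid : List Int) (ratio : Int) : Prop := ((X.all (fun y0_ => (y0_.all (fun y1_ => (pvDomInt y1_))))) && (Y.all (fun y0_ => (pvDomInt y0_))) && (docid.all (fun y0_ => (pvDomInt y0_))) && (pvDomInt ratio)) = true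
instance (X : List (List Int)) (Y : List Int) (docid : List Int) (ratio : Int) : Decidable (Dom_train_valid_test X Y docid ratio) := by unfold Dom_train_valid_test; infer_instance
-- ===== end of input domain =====

-- B drops A's running hash-counter loop entirely: it labels index i by counting docid[i]
-- in the PREFIX docid[:i+1] and builds the five outputs from filtered index lists
-- (alternative decomposition, O(n^2) vs A's O(n); not claimed faster).

-- ===== PORT A =====
-- the single for-loop of A: state = (X_train, Y_train, X_valid, Y_valid, idcount_dict, valid_docid)
def tvtA_loop (Y docid : List Int) (ratio : Int) :
    List (Int × List Int) →
    List (List Int) → List Int → List (List Int) → List Int →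
    PySem.Dict Int Int → List Int →
    List (List Int) × List Int × List (List Int) × List Int × List Int
  | [], Xtr, Ytr, Xv, Yv, _, vd => (Xtr, Ytr, Xv, Yv, vd)
  | (i, doc) :: rest, Xtr, Ytr, Xv, Yv, dct, vd =>
    let doc_id := PySem.List.pyGetD docid i 0   -- docid[i]; Pre_ keeps i in range
    if dct.contains doc_id then
      let dct' := dct.insert doc_id (dct.getD doc_id 0 + 1)  -- key present, so getD reads the stored count
      let num_doc := dct'.getD doc_id 0
      if PySem.Int.mod num_doc ratio = 0 then
        tvtA_loop Y docid ratio rest Xtr Ytr (Xv ++ [doc]) (Yv ++ [PySem.List.pyGetD Y i 0]) dct' (vd ++ [doc_id])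
      else
        tvtA_loop Y docid ratio rest (Xtr ++ [doc]) (Ytr ++ [PySem.List.pyGetD Y i 0]) Xv Yv dct' vd
    else
      tvtA_loop Y docid ratio rest (Xtr ++ [doc]) (Ytr ++ [PySem.List.pyGetD Y i 0]) Xv Yv (dct.insert doc_id 1) vd

def train_valid_test (X : List (List Int)) (Y : List Int) (docid : List Int) (ratio : Int) : List (List Int) × List Int × List (List Int) × List Int × List Int :=
  tvtA_loop Y docid ratio (PySem.List.enumerate X) [] [] [] [] PySem.Dict.empty []

-- ===== PORT B =====
-- to_valid(i): count docid[i] inside the prefix docid[:i+1]; valid iff repeat and divisible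
def tvtB_toValid (docid : List Int) (ratio : Int) (i : Nat) : Bool :=
  let c : Int := (PySem.List.count (PySem.List.slice docid none (some ((i : Int) + 1))) (PySem.List.pyGetD docid (i : Int) 0) : Nat)
  decide (1 < c) && decide (PySem.Int.mod c ratio = 0)

-- the four comprehensions: index lists filtered by the label, then indexed reads
def train_valid_test_alt (X : List (List Int)) (Y : List Int) (docid : List Int) (ratio : Int) : List (List Int) × List Int × List (List Int) × List Int × List Int :=
  let n := X.length
  let train := (List.range n).filter (fun i => ! tvtB_toValid docid ratio i)
  let valid := (List.range n).filter (tvtB_toValid docid ratio)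
  (train.map (fun (i : Nat) => PySem.List.pyGetD X (i : Int) []),
   train.map (fun (i : Nat) => PySem.List.pyGetD Y (i : Int) 0),
   valid.map (fun (i : Nat) => PySem.List.pyGetD X (i : Int) []),
   valid.map (fun (i : Nat) => PySem.List.pyGetD Y (i : Int) 0),
   valid.map (fun (i : Nat) => PySem.List.pyGetD docid (i : Int) 0))

-- ===== PRECONDITION & SPEC =====
-- Pre_ excludes exactly the inputs where Python A raises: Y or docid shorter than X
-- (IndexError on Y[i]/docid[i]) and ratio == 0 with a repeated docid among the first
-- len(X) docids (ZeroDivisionError on num_doc % ratio).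
def Pre_train_valid_test (X : List (List Int)) (Y : List Int) (docid : List Int) (ratio : Int) : Prop :=
  X.length ≤ Y.length ∧ X.length ≤ docid.length ∧ (ratio ≠ 0 ∨ (docid.take X.length).Nodup)
instance (X : List (List Int)) (Y : List Int) (docid : List Int) (ratio : Int) : Decidable (Pre_train_valid_test X Y docid ratio) := by unfold Pre_train_valid_test; infer_instance

def pvWitness_train_valid_test : List (List Int) × List Int × List Int × Int := ([[1], [2], [3]], [0, 1, 0], [7, 7, 7], 2)

def Spec_train_valid_test (X : List (List Int)) (Y : List Int) (docid : List Int) (ratio : Int) (out : List (List Int) × List Int × List (List Int) × List Int × List Int) : Prop := out = train_valid_test_alt X Y docid ratio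
instance (X : List (List Int)) (Y : List Int) (docid : List Int) (ratio : Int) (out : List (List Int) × List Int × List (List Int) × List Int × List Int) : Decidable (Spec_train_valid_test X Y docid ratio out) := by unfold Spec_train_valid_test; infer_instance

-- ===== CLAIM (what is proved, stated in full; the proofs are below) =====
def Claim_equal_train_valid_test : Prop := ∀ (X : List (List Int)) (Y : List Int) (docid : List Int) (ratio : Int), Dom_train_valid_test X Y docid ratio → Pre_train_valid_test X Y docid ratio → Spec_train_valid_test X Y docid ratio (train_valid_test X Y docid ratio)

-- ===== LEMMAS AND PROOFS =====

-- B's label at index i (i < docid.length), unfolded to a prefix count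
lemma tvtB_toValid_eq (docid : List Int) (ratio : Int) (i : Nat) (hi : i < docid.length) :
    tvtB_toValid docid ratio i
      = (decide (1 < ((List.count docid[i] (docid.take (i+1)) : Nat) : Int))
         && decide (PySem.Int.mod ((List.count docid[i] (docid.take (i+1)) : Nat) : Int) ratio = 0)) := by
  unfold tvtB_toValid
  have h1 : ((i : Int) + 1) = ((i + 1 : Nat) : Int) := by push_cast; ring
  rw [h1, PySem.List.slice_to_natCast, PySem.List.count_eq, PySem.List.pyGetD_natCast,
      List.getD_eq_getElem _ _ hi]

-- the counter invariant: the dict stores exactly the positive prefix counts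
def tvtInv (docid : List Int) (i : Nat) (cnt : PySem.Dict Int Int) : Prop :=
  ∀ d : Int, cnt.get? d = if 0 < List.count d (docid.take i) then some ((List.count d (docid.take i) : Nat) : Int) else none

lemma tvtInv_step (docid : List Int) (i : Nat) (cnt : PySem.Dict Int Int)
    (hi : i < docid.length) (hinv : tvtInv docid i cnt) (c : Int)
    (hc : c = ((List.count docid[i] (docid.take i) : Nat) : Int) + 1) :
    tvtInv docid (i + 1) (cnt.insert docid[i] c) := by
  intro d
  have htake : docid.take (i+1) = docid.take i ++ [docid[i]] := by
    rw [List.take_add_one, List.getElem?_eq_getElem hi]; rfl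
  rw [PySem.Dict.get?_insert, htake, List.count_append]
  by_cases hd : d = docid[i]
  · rw [if_pos hd, hd]
    have hcs : List.count docid[i] [docid[i]] = 1 := by simp
    rw [hcs, if_pos (by omega), hc]
    push_cast; ring_nf
  · have hcs : List.count d [docid[i]] = 0 := by
      simp [show docid[i] ≠ d from fun h => hd h.symm]
    rw [if_neg hd, hinv d, hcs]
    simp

-- main induction: A's loop from position i = accumulators ++ B's filtered tails from i
lemma tvtA_eq_tails (X : List (List Int)) (Y docid : List Int) (ratio : Int)
    (hY : X.length ≤ Y.length) (hD : X.length ≤ docid.length) :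
    ∀ (xs : List (List Int)) (i : Nat), X.drop i = xs →
    ∀ (cnt : PySem.Dict Int Int), tvtInv docid i cnt →
    ∀ (Xtr : List (List Int)) (Ytr : List Int) (Xv : List (List Int)) (Yv : List Int) (vd : List Int),
      tvtA_loop Y docid ratio (PySem.List.enumerate xs (i : Int)) Xtr Ytr Xv Yv cnt vd
        = (Xtr ++ ((List.range' i (X.length - i)).filter (fun j => ! tvtB_toValid docid ratio j)).map (fun (j : Nat) => PySem.List.pyGetD X (j : Int) []),
           Ytr ++ ((List.range' i (X.length - i)).filter (fun j => ! tvtB_toValid docid ratio j)).map (fun (j : Nat) => PySem.List.pyGetD Y (j : Int) 0),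
           Xv ++ ((List.range' i (X.length - i)).filter (tvtB_toValid docid ratio)).map (fun (j : Nat) => PySem.List.pyGetD X (j : Int) []),
           Yv ++ ((List.range' i (X.length - i)).filter (tvtB_toValid docid ratio)).map (fun (j : Nat) => PySem.List.pyGetD Y (j : Int) 0),
           vd ++ ((List.range' i (X.length - i)).filter (tvtB_toValid docid ratio)).map (fun (j : Nat) => PySem.List.pyGetD docid (j : Int) 0)) := by
  intro xs
  induction xs with
  | nil =>
    intro i hxs cnt hinv Xtr Ytr Xv Yv vd
    have hlen : X.length ≤ i := by
      by_contra h
      rw [List.drop_eq_getElem_cons (by omega)] at hxs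
      exact List.cons_ne_nil _ _ hxs
    have : X.length - i = 0 := by omega
    simp [this, PySem.List.enumerate_nil, tvtA_loop]
  | cons x xs' ih =>
    intro i hxs cnt hinv Xtr Ytr Xv Yv vd
    have hilt : i < X.length := by
      by_contra h
      rw [List.drop_eq_nil_iff.mpr (by omega)] at hxs
      exact List.cons_ne_nil _ _ hxs.symm
    rw [List.drop_eq_getElem_cons hilt] at hxs
    obtain ⟨hx, hxs'⟩ : X[i] = x ∧ X.drop (i+1) = xs' := ⟨(List.cons.injEq _ _ _ _ ▸ hxs).1, (List.cons.injEq _ _ _ _ ▸ hxs).2⟩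
    have hiD : i < docid.length := by omega
    have hiY : i < Y.length := by omega
    have hrange : List.range' i (X.length - i) = i :: List.range' (i+1) (X.length - (i+1)) := by
      have : X.length - i = (X.length - (i+1)) + 1 := by omega
      rw [this, List.range'_succ]
    -- abbreviations
    set c0 : Nat := List.count docid[i] (docid.take i) with hc0
    have hcount1 : List.count docid[i] (docid.take (i+1)) = c0 + 1 := by
      rw [List.take_add_one, List.getElem?_eq_getElem hiD, Option.toList_some,
          List.count_append, List.count_singleton, hc0]
      simp
    have hV : tvtB_toValid docid ratio i
        = (decide (0 < c0) && decide (PySem.Int.mod (((c0 : Nat) : Int) + 1) ratio = 0)) := by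
      rw [tvtB_toValid_eq docid ratio i hiD, hcount1]
      have h1 : (1 : Int) < ((c0 + 1 : Nat) : Int) ↔ 0 < c0 := by push_cast; omega
      have h2 : (((c0 + 1 : Nat) : Int)) = ((c0 : Nat) : Int) + 1 := by push_cast; ring
      rw [h2]
      congr 1
      simp only [decide_eq_decide]
      exact h1
    have hdocget : PySem.List.pyGetD docid (i : Int) 0 = docid[i] := by
      rw [PySem.List.pyGetD_natCast, List.getD_eq_getElem _ _ hiD]
    have hcast : (i : Int) + 1 = ((i + 1 : Nat) : Int) := by push_cast; ring
    rw [PySem.List.enumerate_cons]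
    simp only [tvtA_loop, hdocget, hrange]
    have hget := hinv docid[i]
    rw [← hc0] at hget
    by_cases hpos : 0 < c0
    · -- key present
      have hcont : cnt.contains docid[i] = true := by
        cases hb : cnt.contains docid[i]
        · have hnone := (PySem.Dict.get?_eq_none_iff_contains cnt docid[i]).mpr hb
          rw [hget, if_pos hpos] at hnone
          exact absurd hnone (by simp)
        · rfl
      have hgetD : cnt.getD docid[i] 0 = ((c0 : Nat) : Int) := by
        rw [PySem.Dict.getD_eq_get?_getD, hget, if_pos hpos]; rfl
      have hinsD : (cnt.insert docid[i] (((c0 : Nat) : Int) + 1)).getD docid[i] 0 = ((c0 : Nat) : Int) + 1 := by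
        rw [PySem.Dict.getD_eq_get?_getD, PySem.Dict.get?_insert, if_pos rfl]; rfl
      have hinv' : tvtInv docid (i+1) (cnt.insert docid[i] (((c0 : Nat) : Int) + 1)) :=
        tvtInv_step docid i cnt hiD hinv _ rfl
      rw [if_pos hcont]
      simp only [hgetD, hinsD]
      by_cases hm : PySem.Int.mod (((c0 : Nat) : Int) + 1) ratio = 0
      · -- goes to valid on both sides
        have hVtrue : tvtB_toValid docid ratio i = true := by rw [hV]; simp [hpos, hm]
        rw [if_pos hm]
        rw [hcast, ih (i+1) hxs' _ hinv']
        simp [hVtrue, hx, PySem.List.pyGetD_natCast,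
              List.getElem?_eq_getElem hilt, List.getElem?_eq_getElem hiY, List.getElem?_eq_getElem hiD]
      · have hVfalse : tvtB_toValid docid ratio i = false := by rw [hV]; simp [hm]
        rw [if_neg hm]
        rw [hcast, ih (i+1) hxs' _ hinv']
        simp [hVfalse, hx, PySem.List.pyGetD_natCast,
              List.getElem?_eq_getElem hilt, List.getElem?_eq_getElem hiY]
    · -- new key: c0 = 0
      have hc00 : c0 = 0 := by omega
      have hcont : cnt.contains docid[i] = false := by
        rw [← PySem.Dict.get?_eq_none_iff_contains, hget, if_neg hpos]
      have hVfalse : tvtB_toValid docid ratio i = false := by rw [hV]; simp [hpos]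
      have hinv' : tvtInv docid (i+1) (cnt.insert docid[i] 1) := by
        have := tvtInv_step docid i cnt hiD hinv (((c0 : Nat) : Int) + 1) rfl
        rw [hc00] at this
        simpa using this
      rw [hcont]
      simp only [Bool.false_eq_true, if_false]
      rw [hcast, ih (i+1) hxs' _ hinv']
      simp [hVfalse, hx, PySem.List.pyGetD_natCast,
            List.getElem?_eq_getElem hilt, List.getElem?_eq_getElem hiY]

-- ===== VERDICT (by name: the statement is the Claim_ definition above) =====
theorem train_valid_test_spec : Claim_equal_train_valid_test := by
  intro X Y docid ratio _ hpre
  obtain ⟨hY, hD, _⟩ := hpre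
  unfold Spec_train_valid_test train_valid_test train_valid_test_alt
  have h0 : PySem.List.enumerate X = PySem.List.enumerate X ((0 : ℕ) : Int) := by norm_num
  have hinv0 : tvtInv docid 0 PySem.Dict.empty := by
    intro d; simp [PySem.Dict.get?_empty]
  rw [h0, tvtA_eq_tails X Y docid ratio hY hD X 0 (by simp) _ hinv0]
  simp [List.range_eq_range']
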